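-- pv_equiv track=rewrite | github.com/zh-hang/algorithms | problems/TSP.py | get_all_routes
-- ===== SOURCE A (Python) =====
-- import copy
--
-- def get_all_routes(G, R):
--     NR = []
--     isOver = True
--     for i in R:
--         for j in G:
--             if j not in i:
--                 tmp = copy.deepcopy(i)
--                 tmp.append(j)
--                 NR.append(tmp)
--                 isOver = False
--     if isOver:
--         return R
--     return get_all_routes(G, NR)
-- ===== SOURCE B (Python) =====
-- def get_all_routes(G, R):
--     if not R:
--         return R
--     def missing(i):
--         return len([j for j in set(G) if j not in i])
--     k = max(missing(i) for i in R)
--     def dfs(route, d):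
--         if d == 0:
--             return [route]
--         return [r for j in G if j not in route for r in dfs(route + [j], d - 1)]
--     return [r for i in R for r in dfs(i, k)]
-- ===== Notes on version B (the rewrite author's own statement) =====
-- stated objective: alternative
-- what changed: The level-by-level breadth-first regeneration (rebuild every partial route one step longer each round until no route extends) is replaced by computing the target depth k = max over routes of the number of distinct extendable values, then a depth-first search that emits each route's depth-k completions directly, skipping all intermediate levels.
import Mathlib
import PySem

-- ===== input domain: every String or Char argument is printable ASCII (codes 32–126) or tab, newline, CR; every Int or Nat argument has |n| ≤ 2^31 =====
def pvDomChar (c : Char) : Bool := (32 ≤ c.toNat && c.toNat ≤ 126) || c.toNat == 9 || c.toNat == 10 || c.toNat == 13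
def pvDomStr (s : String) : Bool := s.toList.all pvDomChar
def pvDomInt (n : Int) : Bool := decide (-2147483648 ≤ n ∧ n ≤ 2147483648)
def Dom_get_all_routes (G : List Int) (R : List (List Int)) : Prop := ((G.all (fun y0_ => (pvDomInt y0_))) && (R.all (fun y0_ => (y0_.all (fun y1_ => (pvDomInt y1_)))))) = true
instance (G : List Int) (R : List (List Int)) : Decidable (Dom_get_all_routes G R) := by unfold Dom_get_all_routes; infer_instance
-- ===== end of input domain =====

-- B replaces A's level-by-level breadth-first regeneration by computing the target depth
-- (max over routes of the number of distinct extendable values) and emitting each route's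
-- depth-k completions by a direct depth-first search (objective: alternative algorithm).

-- Shared helper (Source B's 'missing', and A's termination measure):
-- number of distinct values of G not yet in route i.
def pvMissing (G : List Int) (i : List Int) : Nat :=
  ((PySem.Set.ofList G).filter (fun j => j ∉ i)).length

-- Termination measure for A's port: the largest pvMissing over the routes of R.
-- These definitions and lemmas are cited by port A's decreasing_by, so they stay above it.
def pvMu (G : List Int) (R : List (List Int)) : Nat :=
  (R.map (pvMissing G)).foldr max 0

theorem pv_le_foldr_max : ∀ {l : List Nat} {x : Nat}, x ∈ l → x ≤ l.foldr max 0 := by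
  intro l
  induction l with
  | nil => intro x h; cases h
  | cons a t ih =>
    intro x h
    rcases List.mem_cons.mp h with rfl | h
    · exact le_max_left ..
    · exact le_trans (ih h) (le_max_right ..)

theorem pv_foldr_max_le : ∀ {l : List Nat} {c : Nat}, (∀ x ∈ l, x ≤ c) → l.foldr max 0 ≤ c := by
  intro l
  induction l with
  | nil => intros; simp
  | cons a t ih =>
    intro c h
    simp only [List.foldr, max_le_iff]
    exact ⟨h a (List.mem_cons_self ..), ih (fun x hx => h x (List.mem_cons_of_mem _ hx))⟩

-- One extension strictly decreases the missing count.
theorem pvMissing_append {G : List Int} {i : List Int} {j : Int}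
    (hjG : j ∈ G) (hji : j ∉ i) : pvMissing G (i ++ [j]) = pvMissing G i - 1 := by
  unfold pvMissing
  have hstep : (PySem.Set.ofList G).filter (fun j' => decide (j' ∉ i ++ [j]))
      = ((PySem.Set.ofList G).filter (fun j' => j' ∉ i)).filter (fun j' => j' != j) := by
    rw [List.filter_filter]
    apply List.filter_congr
    intro a _
    by_cases h1 : a ∈ i <;> by_cases h2 : a = j <;> simp [h1, h2]
  have hnd : (((PySem.Set.ofList G)).filter (fun j' => j' ∉ i)).Nodup :=
    (PySem.Set.nodup_ofList G).filter _
  have hjm : j ∈ ((PySem.Set.ofList G)).filter (fun j' => j' ∉ i) := by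
    simp only [List.mem_filter, decide_eq_true_eq]
    exact ⟨(PySem.Set.mem_ofList G j).mpr hjG, hji⟩
  rw [hstep, ← List.Nodup.erase_eq_filter hnd, List.length_erase_of_mem hjm]

theorem pvMissing_pos {G : List Int} {i : List Int} {j : Int}
    (hjG : j ∈ G) (hji : j ∉ i) : 1 ≤ pvMissing G i := by
  have hjm : j ∈ ((PySem.Set.ofList G)).filter (fun j' => j' ∉ i) := by
    simp only [List.mem_filter, decide_eq_true_eq]
    exact ⟨(PySem.Set.mem_ofList G j).mpr hjG, hji⟩
  have := List.length_pos_of_mem hjm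
  unfold pvMissing; omega

-- Proof-side characterization of one breadth level of A (used by A's termination and the proofs).
def pvStep (G : List Int) (R : List (List Int)) : List (List Int) :=
  R.flatMap (fun i => (G.filter (fun j => j ∉ i)).map (fun j => i ++ [j]))

theorem pvStep_decreases {G : List Int} {R : List (List Int)}
    (h : pvStep G R ≠ []) : pvMu G (pvStep G R) < pvMu G R := by
  rcases List.exists_mem_of_ne_nil _ h with ⟨x, hx⟩
  simp only [pvStep, List.mem_flatMap, List.mem_map, List.mem_filter,
    decide_eq_true_eq] at hx
  rcases hx with ⟨i, hiR, j, ⟨hjG, hji⟩, hxe⟩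
  have hmu1 : 1 ≤ pvMu G R :=
    le_trans (pvMissing_pos hjG hji) (pv_le_foldr_max (List.mem_map.mpr ⟨i, hiR, rfl⟩))
  have hall : ∀ x ∈ (pvStep G R).map (pvMissing G), x ≤ pvMu G R - 1 := by
    intro x hx
    rcases List.mem_map.mp hx with ⟨r, hr, rfl⟩
    simp only [pvStep, List.mem_flatMap, List.mem_map, List.mem_filter,
      decide_eq_true_eq] at hr
    rcases hr with ⟨i', hi'R, j', ⟨hj'G, hj'i⟩, rfl⟩
    have heq := pvMissing_append hj'G hj'i
    have hle : pvMissing G i' ≤ pvMu G R :=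
      pv_le_foldr_max (List.mem_map.mpr ⟨i', hi'R, rfl⟩)
    omega
  have := pv_foldr_max_le hall
  unfold pvMu at *
  omega

-- ===== PORT A =====
-- A's nested for-loops accumulating (NR, isOver); deepcopy-then-append of a value list is i ++ [j].
def pvLoopA (G : List Int) (R : List (List Int)) : List (List Int) × Bool :=
  R.foldl (fun st i =>
    G.foldl (fun st j =>
      if j ∉ i then (st.1 ++ [i ++ [j]], false) else st) st) ([], true)

theorem pv_isEmpty_append {α : Type} (l1 l2 : List α) :
    (l1 ++ l2).isEmpty = (l1.isEmpty && l2.isEmpty) := by cases l1 <;> simp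

-- Characterization of A's loop, cited by port A's decreasing_by.
theorem pvLoopA_eq (G : List Int) (R : List (List Int)) :
    pvLoopA G R = (pvStep G R, (pvStep G R).isEmpty) := by
  unfold pvLoopA
  suffices h : ∀ (R' : List (List Int)) (acc : List (List Int)) (b : Bool),
      R'.foldl (fun st i =>
        G.foldl (fun st j =>
          if j ∉ i then (st.1 ++ [i ++ [j]], false) else st) st) (acc, b)
      = (acc ++ pvStep G R', b && (pvStep G R').isEmpty) by
    rw [h]; simp
  intro R'
  induction R' with
  | nil => intro acc b; simp [pvStep]
  | cons i t ih =>
    intro acc b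
    have inner : ∀ (G' : List Int) (acc : List (List Int)) (b : Bool),
        G'.foldl (fun st j =>
          if j ∉ i then (st.1 ++ [i ++ [j]], false) else st) (acc, b)
        = (acc ++ (G'.filter (fun j => j ∉ i)).map (fun j => i ++ [j]),
           b && ((G'.filter (fun j => j ∉ i)).map (fun j => i ++ [j])).isEmpty) := by
      intro G'
      induction G' with
      | nil => intro acc b; simp
      | cons j t2 ih2 =>
        intro acc b
        rw [List.foldl_cons]
        by_cases hj : j ∈ i
        · rw [if_neg (not_not_intro hj), ih2]
          simp [hj]
        · rw [if_pos hj, ih2]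
          simp [hj]
    simp only [List.foldl, inner, ih]
    simp [pvStep, Bool.and_assoc, pv_isEmpty_append]

-- Literal transliteration of A: run the nested loops, return R if isOver else recurse on NR.
def get_all_routes (G : List Int) (R : List (List Int)) : List (List Int) :=
  let st := pvLoopA G R
  if st.2 then R else get_all_routes G st.1
termination_by pvMu G R
decreasing_by
  rename_i hfalse
  simp only [st, pvLoopA_eq] at hfalse ⊢
  simp only [List.isEmpty_iff] at hfalse
  exact pvStep_decreases hfalse

-- ===== PORT B =====
-- Source B's dfs: all routes obtained from `route` by exactly d extensions by elements of G
-- not yet present, in G's order ([] when a branch dies before depth d).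
def pvDfs (G : List Int) (route : List Int) : Nat → List (List Int)
  | 0 => [route]
  | d + 1 => (G.filter (fun j => j ∉ route)).flatMap (fun j => pvDfs G (route ++ [j]) d)

-- Literal transliteration of B: empty guard; k = max of the missing counts
-- (Python's max over a nonempty sequence); one comprehension emitting each route's
-- depth-k completions.
def get_all_routes_alt (G : List Int) (R : List (List Int)) : List (List Int) :=
  match R with
  | [] => R
  | i0 :: rest =>
    let k := (rest.map (pvMissing G)).foldl max (pvMissing G i0)
    (i0 :: rest).flatMap (fun i => pvDfs G i k)

-- ===== PRECONDITION & SPEC =====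
def Spec_get_all_routes (G : List Int) (R : List (List Int)) (out : List (List Int)) : Prop := out = get_all_routes_alt G R
instance (G : List Int) (R : List (List Int)) (out : List (List Int)) : Decidable (Spec_get_all_routes G R out) := by unfold Spec_get_all_routes; infer_instance

-- ===== CLAIM (what is proved, stated in full; the proofs are below) =====
def Claim_equal_get_all_routes : Prop := ∀ (G : List Int) (R : List (List Int)), Dom_get_all_routes G R → Spec_get_all_routes G R (get_all_routes G R)

-- ===== LEMMAS AND PROOFS =====
theorem pv_foldl_max (l : List Nat) : ∀ a : Nat, l.foldl max a = max a (l.foldr max 0) := by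
  induction l with
  | nil => intro a; simp
  | cons b t ih =>
    intro a
    rw [List.foldl_cons, ih, List.foldr_cons, ← max_assoc]

theorem pv_foldr_max_cases : ∀ (l : List Nat), l.foldr max 0 = 0 ∨ l.foldr max 0 ∈ l := by
  intro l
  induction l with
  | nil => exact Or.inl rfl
  | cons a t ih =>
    rw [List.foldr_cons]
    rcases Nat.le_total a (t.foldr max 0) with h | h
    · rw [max_eq_right h]
      rcases ih with h0 | hm
      · exact Or.inl h0
      · exact Or.inr (List.mem_cons_of_mem _ hm)
    · rw [max_eq_left h]
      exact Or.inr (List.mem_cons_self ..)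

theorem pvMu_zero_iff (G : List Int) (R : List (List Int)) :
    pvMu G R = 0 ↔ pvStep G R = [] := by
  constructor
  · intro h
    unfold pvStep
    rw [List.flatMap_eq_nil_iff]
    intro i hi
    have hle : pvMissing G i ≤ 0 := h ▸ pv_le_foldr_max (List.mem_map.mpr ⟨i, hi, rfl⟩)
    rcases hG : G.filter (fun j => j ∉ i) with _ | ⟨j, t⟩
    · simp
    · exfalso
      have hj : j ∈ G.filter (fun j => j ∉ i) := hG ▸ List.mem_cons_self ..
      simp only [List.mem_filter, decide_eq_true_eq] at hj
      have := pvMissing_pos hj.1 hj.2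
      omega
  · intro h
    unfold pvMu
    apply Nat.le_zero.mp
    apply pv_foldr_max_le
    intro x hx
    rcases List.mem_map.mp hx with ⟨i, hi, rfl⟩
    by_contra hpos
    rcases hF : G.filter (fun j => j ∉ i) with _ | ⟨j, t⟩
    · have : pvMissing G i = 0 := by
        unfold pvMissing
        have : ∀ a ∈ PySem.Set.ofList G, ¬ (decide (a ∉ i) = true) := by
          intro a ha
          have haG : a ∈ G := (PySem.Set.mem_ofList G a).mp ha
          intro hd
          simp only [decide_eq_true_eq] at hd
          have : a ∈ G.filter (fun j => j ∉ i) := by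
            simp only [List.mem_filter, decide_eq_true_eq]; exact ⟨haG, hd⟩
          rw [hF] at this; cases this
        rw [List.filter_eq_nil_iff.mpr this]
        rfl
      omega
    · have hj : j ∈ G.filter (fun j => j ∉ i) := hF ▸ List.mem_cons_self ..
      simp only [List.mem_filter, decide_eq_true_eq] at hj
      have hmem : (i ++ [j]) ∈ pvStep G R := by
        simp only [pvStep, List.mem_flatMap]
        exact ⟨i, hi, List.mem_map.mpr ⟨j, by
          simp only [List.mem_filter, decide_eq_true_eq]; exact hj, rfl⟩⟩
      rw [h] at hmem; cases hmem

theorem pvMu_step (G : List Int) (R : List (List Int)) (h : pvMu G R ≠ 0) :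
    pvMu G (pvStep G R) = pvMu G R - 1 := by
  apply Nat.le_antisymm
  · apply pv_foldr_max_le
    intro x hx
    rcases List.mem_map.mp hx with ⟨r, hr, rfl⟩
    simp only [pvStep, List.mem_flatMap, List.mem_map, List.mem_filter,
      decide_eq_true_eq] at hr
    rcases hr with ⟨i, hiR, j, ⟨hjG, hji⟩, rfl⟩
    have heq := pvMissing_append hjG hji
    have hle : pvMissing G i ≤ pvMu G R :=
      pv_le_foldr_max (List.mem_map.mpr ⟨i, hiR, rfl⟩)
    omega
  · rcases pv_foldr_max_cases (R.map (pvMissing G)) with h0 | hm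
    · exact absurd h0 h
    · rcases List.mem_map.mp hm with ⟨i, hiR, hival⟩
      have hmuR : pvMu G R = (R.map (pvMissing G)).foldr max 0 := rfl
      have hpos : 1 ≤ pvMissing G i := by omega
      rcases hF : G.filter (fun j => j ∉ i) with _ | ⟨j, t⟩
      · exfalso
        have : pvMissing G i = 0 := by
          unfold pvMissing
          have : ∀ a ∈ PySem.Set.ofList G, ¬ (decide (a ∉ i) = true) := by
            intro a ha
            have haG : a ∈ G := (PySem.Set.mem_ofList G a).mp ha
            intro hd
            simp only [decide_eq_true_eq] at hd
            have : a ∈ G.filter (fun j => j ∉ i) := by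
              simp only [List.mem_filter, decide_eq_true_eq]; exact ⟨haG, hd⟩
            rw [hF] at this; cases this
          rw [List.filter_eq_nil_iff.mpr this]
          rfl
        omega
      · have hj : j ∈ G.filter (fun j => j ∉ i) := hF ▸ List.mem_cons_self ..
        simp only [List.mem_filter, decide_eq_true_eq] at hj
        have hchild : (i ++ [j]) ∈ pvStep G R := by
          simp only [pvStep, List.mem_flatMap]
          exact ⟨i, hiR, List.mem_map.mpr ⟨j, by
            simp only [List.mem_filter, decide_eq_true_eq]; exact hj, rfl⟩⟩
        have hle := pv_le_foldr_max (l := (pvStep G R).map (pvMissing G))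
          (List.mem_map.mpr ⟨i ++ [j], hchild, rfl⟩)
        have heq := pvMissing_append hj.1 hj.2
        have hmuR : pvMu G R = (R.map (pvMissing G)).foldr max 0 := rfl
        have hmuS : pvMu G (pvStep G R) = ((pvStep G R).map (pvMissing G)).foldr max 0 := rfl
        omega

-- Main invariant: A equals the flatMap of depth-(pvMu) DFS completions.
theorem pv_main (G : List Int) : ∀ (n : Nat) (R : List (List Int)), pvMu G R ≤ n →
    get_all_routes G R = R.flatMap (fun i => pvDfs G i (pvMu G R)) := by
  intro n
  induction n using Nat.strong_induction_on with
  | _ n ih =>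
    intro R hR
    rw [get_all_routes, pvLoopA_eq]
    by_cases hz : pvMu G R = 0
    · have he : pvStep G R = [] := (pvMu_zero_iff G R).mp hz
      simp [he, hz, pvDfs]
    · have hne : pvStep G R ≠ [] := fun he => hz ((pvMu_zero_iff G R).mpr he)
      have hemp : (pvStep G R).isEmpty = false := by
        cases h : pvStep G R with
        | nil => exact absurd h hne
        | cons a t => simp
      simp only [hemp, Bool.false_eq_true, if_false]
      have hmu := pvMu_step G R hz
      have hrec : get_all_routes G (pvStep G R)
          = (pvStep G R).flatMap (fun i => pvDfs G i (pvMu G (pvStep G R))) := by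
        apply ih (pvMu G (pvStep G R)) (by omega) _ le_rfl
      rw [hrec, hmu]
      obtain ⟨m, hm⟩ : ∃ m, pvMu G R = m + 1 := ⟨pvMu G R - 1, by omega⟩
      rw [hm]
      simp only [Nat.add_sub_cancel, pvStep, List.flatMap_assoc, List.flatMap_map]
      apply List.flatMap_congr
      intro i _
      rfl

-- ===== VERDICT (by name: the statement is the Claim_ definition above) =====
theorem get_all_routes_spec : Claim_equal_get_all_routes := by
  intro G R _
  unfold Spec_get_all_routes
  cases R with
  | nil =>
    rw [get_all_routes, pvLoopA_eq]
    simp [pvStep, get_all_routes_alt]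
  | cons i0 rest =>
    rw [pv_main G (pvMu G (i0 :: rest)) (i0 :: rest) le_rfl]
    have halt : get_all_routes_alt G (i0 :: rest)
        = (i0 :: rest).flatMap
            (fun i => pvDfs G i ((rest.map (pvMissing G)).foldl max (pvMissing G i0))) := rfl
    rw [halt]
    have hk : (rest.map (pvMissing G)).foldl max (pvMissing G i0) = pvMu G (i0 :: rest) := by
      rw [pv_foldl_max]
      rfl
    rw [hk]
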